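-- pv_equiv track=rewrite | github.com/notsurabhi24/healthbot | utils/forward_chain.py | forward_chain
-- ===== SOURCE A (Python) =====
-- def forward_chain(rules, facts):
--     conclusions = set(facts)
--     changed = True
--     while changed:
--         changed = False
--         for antecedents, consequent in rules:
--             if all(f in conclusions for f in antecedents) and consequent not in conclusions:
--                 conclusions.add(consequent)
--                 changed = True
--     return conclusions
-- ===== SOURCE B (Python) =====
-- def forward_chain(rules, facts):
--     # Dowling-Gallier: per-rule counter of still-missing distinct antecedents,
--     # a fact->rules index, and a worklist of facts processed exactly once each.
--     conclusions = set(facts)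
--     index = {}
--     counts = []
--     for i, (antecedents, consequent) in enumerate(rules):
--         distinct = list(dict.fromkeys(antecedents))
--         counts.append(len(distinct))
--         for f in distinct:
--             index.setdefault(f, []).append(i)
--     queue = list(dict.fromkeys(facts))
--     for i, (antecedents, consequent) in enumerate(rules):
--         if counts[i] == 0 and consequent not in conclusions:
--             conclusions.add(consequent)
--             queue.append(consequent)
--     while queue:
--         fact = queue.pop()
--         for i in index.get(fact, []):
--             counts[i] -= 1
--             if counts[i] == 0:
--                 consequent = rules[i][1]
--                 if consequent not in conclusions:
--                     conclusions.add(consequent)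
--                     queue.append(consequent)
--     return conclusions
-- ===== Notes on version B (the rewrite author's own statement) =====
-- stated objective: alternative
-- what changed: B replaces A's repeated full passes over the rule list (with a changed flag) by Dowling-Gallier forward chaining: it builds a fact-to-rule index and a per-rule counter of still-missing distinct antecedents once, then processes a worklist on which every fact appears at most once, decrementing counters and firing a rule exactly when its counter reaches zero - no rule is ever rescanned and no antecedent list is re-checked.
import Mathlib
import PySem

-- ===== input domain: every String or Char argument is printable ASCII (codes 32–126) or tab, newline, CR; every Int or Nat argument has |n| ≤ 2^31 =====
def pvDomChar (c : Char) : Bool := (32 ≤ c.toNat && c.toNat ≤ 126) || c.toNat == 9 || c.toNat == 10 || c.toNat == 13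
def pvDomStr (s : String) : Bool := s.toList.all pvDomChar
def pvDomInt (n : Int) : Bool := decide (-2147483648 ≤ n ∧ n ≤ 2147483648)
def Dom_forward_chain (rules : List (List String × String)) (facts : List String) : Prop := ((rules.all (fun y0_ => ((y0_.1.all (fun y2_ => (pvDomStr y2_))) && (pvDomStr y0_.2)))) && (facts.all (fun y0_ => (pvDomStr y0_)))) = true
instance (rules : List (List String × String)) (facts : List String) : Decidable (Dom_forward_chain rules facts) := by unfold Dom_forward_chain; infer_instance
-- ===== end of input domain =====

-- B replaces A's repeated full passes over the rule list by Dowling–Gallier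
-- forward chaining: a per-rule counter of still-missing distinct antecedents, a
-- fact→rules index, and a worklist on which every fact is processed exactly once
-- (objective: alternative — better worst-case behaviour, not measured faster on
-- the generated timing inputs). Both Pythons return an unordered set; both ports
-- present that set as its sorted element list (Python's set iteration order is
-- not modelled; outputs compare as sets).

-- ===== PORT A =====
-- one step of A's inner 'for' loop: state = (conclusions, changed)
def fcStepA (st : PySem.Set String × Bool) (r : List String × String) : PySem.Set String × Bool :=
  if (r.1.all fun f => PySem.Set.contains st.1 f) && !(PySem.Set.contains st.1 r.2) then
    (PySem.Set.add st.1 r.2, true)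
  else st

-- A's 'while changed' loop; fuel is a totality guard only: each pass that sets 'changed'
-- adds a missing rule consequent, so at most rules.length changed passes ever run
-- (fuel sufficiency is proved below, in fcLoopA_main).
def fcLoopA (rules : List (List String × String)) : Nat → PySem.Set String → PySem.Set String
  | 0, c => c
  | fuel + 1, c =>
    let st := rules.foldl fcStepA (c, false)
    if st.2 then fcLoopA rules fuel st.1 else st.1

def forward_chain (rules : List (List String × String)) (facts : List String) : List String :=
  PySem.List.sorted (fcLoopA rules (rules.length + 1) (PySem.Set.ofList facts)) (fun x => x) false

-- ===== PORT B =====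
-- index.setdefault(f, []).append(i) for one distinct antecedent f of rule number i
def fcIdxAnt (i : Int) (d : PySem.Dict String (List Int)) (f : String) : PySem.Dict String (List Int) :=
  d.insert f (d.getD f [] ++ [i])

-- one step of 'for i, (antecedents, consequent) in enumerate(rules)': record the
-- number of distinct antecedents and index each of them
def fcBuildStep (st : PySem.Dict String (List Int) × List Int)
    (p : Int × (List String × String)) : PySem.Dict String (List Int) × List Int :=
  ((PySem.List.dedup p.2.1).foldl (fcIdxAnt p.1) st.1,
   st.2 ++ [((PySem.List.dedup p.2.1).length : Int)])

def fcBuild (rules : List (List String × String)) : PySem.Dict String (List Int) × List Int :=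
  (PySem.List.enumerate rules 0).foldl fcBuildStep (PySem.Dict.empty, [])

-- seeding: rules whose counter is already zero fire unconditionally
def fcInitStep (counts : List Int) (st : PySem.Set String × List String)
    (p : Int × (List String × String)) : PySem.Set String × List String :=
  if PySem.List.pyGetD counts p.1 0 == 0 && !(PySem.Set.contains st.1 p.2.2) then
    (PySem.Set.add st.1 p.2.2, st.2 ++ [p.2.2])
  else st

-- one step of 'for i in index.get(fact, [])': decrement the rule's counter and
-- fire when it reaches zero; rules[i] / counts[i] (always in range, see fcIdx_mem)
-- ported by the total pyGetD / pySetD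
def fcFire (rules : List (List String × String))
    (st : PySem.Set String × List String × List Int) (i : Int) :
    PySem.Set String × List String × List Int :=
  let counts := PySem.List.pySetD st.2.2 i (PySem.List.pyGetD st.2.2 i 0 - 1)
  if PySem.List.pyGetD counts i 0 == 0 then
    if !(PySem.Set.contains st.1 (PySem.List.pyGetD rules i ([], "")).2) then
      (PySem.Set.add st.1 (PySem.List.pyGetD rules i ([], "")).2,
       st.2.1 ++ [(PySem.List.pyGetD rules i ([], "")).2], counts)
    else (st.1, st.2.1, counts)
  else (st.1, st.2.1, counts)

-- B's 'while queue' loop (queue.pop() pops the LAST element); fuel is a totality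
-- guard only: pops ≤ pushes ≤ len(set(facts)) + number of derived consequents
-- (proved sufficient in fcLoopB_main)
def fcLoopB (rules : List (List String × String)) (index : PySem.Dict String (List Int)) :
    Nat → PySem.Set String × List String × List Int → PySem.Set String
  | 0, st => st.1
  | fuel + 1, st =>
    if h : st.2.1 = [] then st.1
    else
      fcLoopB rules index fuel
        ((index.getD (st.2.1.getLast h) []).foldl (fcFire rules)
          (st.1, st.2.1.dropLast, st.2.2))

def forward_chain_alt (rules : List (List String × String)) (facts : List String) : List String :=
  let b := fcBuild rules
  let st0 := (PySem.List.enumerate rules 0).foldl (fcInitStep b.2)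
    (PySem.Set.ofList facts, PySem.List.dedup facts)
  PySem.List.sorted (fcLoopB rules b.1 (facts.length + rules.length + 1)
    (st0.1, st0.2, b.2)) (fun x => x) false

-- ===== PRECONDITION & SPEC =====
def Spec_forward_chain (rules : List (List String × String)) (facts : List String) (out : List String) : Prop := out = forward_chain_alt rules facts
instance (rules : List (List String × String)) (facts : List String) (out : List String) : Decidable (Spec_forward_chain rules facts out) := by unfold Spec_forward_chain; infer_instance

-- ===== CLAIM (what is proved, stated in full; the proofs are below) =====
def Claim_equal_forward_chain : Prop := ∀ (rules : List (List String × String)) (facts : List String), Dom_forward_chain rules facts → Spec_forward_chain rules facts (forward_chain rules facts)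

-- ===== LEMMAS AND PROOFS =====

-- derivability: the least set containing facts and closed under rules; both ports
-- compute exactly {x | Deriv rules facts x}
inductive Deriv (rules : List (List String × String)) (facts : List String) : String → Prop
  | base (x : String) : x ∈ facts → Deriv rules facts x
  | step (a : List String) (c : String) : (a, c) ∈ rules → (∀ f ∈ a, Deriv rules facts f) →
      Deriv rules facts c

def fcClosed (rules : List (List String × String)) (S : List String) : Prop :=
  ∀ r ∈ rules, (∀ f ∈ r.1, f ∈ S) → r.2 ∈ S

-- termination potential: number of rule-consequent occurrences not yet derived
def fcPot (rules : List (List String × String)) (S : List String) : Nat :=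
  ((rules.map Prod.snd).filter (fun c => decide (c ∉ S))).length

theorem len_filter_lt {l : List String} {p q : String → Bool} (h : ∀ a, q a = true → p a = true)
    {c : String} (hc : c ∈ l) (hp : p c = true) (hq : q c = false) :
    (l.filter q).length < (l.filter p).length := by
  induction l with
  | nil => cases hc
  | cons a l ih =>
    rcases List.mem_cons.1 hc with rfl | hc
    · simp only [List.filter_cons, hp, hq]
      exact Nat.lt_succ_of_le (List.monotone_filter_right l h).length_le
    · simp only [List.filter_cons]
      cases hqa : q a
      · cases hpa : p a
        · exact ih hc
        · exact Nat.lt_succ_of_lt (ih hc)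
      · have := h a hqa; rw [this]; simpa using ih hc

theorem fcPot_le_of_subset {rules : List (List String × String)} {S T : List String}
    (h : ∀ x ∈ S, x ∈ T) : fcPot rules T ≤ fcPot rules S :=
  (List.monotone_filter_right _ (fun a ha => by
    simp only [decide_eq_true_eq] at ha ⊢
    exact fun haS => ha (h a haS))).length_le

theorem fcPot_lt_of_add {rules : List (List String × String)} {S T : List String} {c : String}
    (hsub : ∀ x ∈ S, x ∈ T) (hc : c ∈ rules.map Prod.snd) (hcS : c ∉ S) (hcT : c ∈ T) :
    fcPot rules T < fcPot rules S := by
  refine len_filter_lt ?_ hc (by simpa using hcS) (by simpa using hcT)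
  intro a ha
  simp only [decide_eq_true_eq] at ha ⊢
  exact fun haS => ha (hsub a haS)

theorem fcPot_le_length (rules : List (List String × String)) (S : List String) :
    fcPot rules S ≤ rules.length :=
  le_trans (List.length_filter_le _ _) (by simp)


theorem fcFoldA_subset (rs : List (List String × String)) (st : PySem.Set String × Bool) :
    ∀ x ∈ st.1, x ∈ (rs.foldl fcStepA st).1 := by
  induction rs generalizing st with
  | nil => exact fun x hx => hx
  | cons r rs ih =>
    intro x hx
    simp only [List.foldl_cons]
    refine ih (fcStepA st r) x ?_
    unfold fcStepA
    split
    · exact (PySem.Set.mem_add _ _ _).2 (Or.inl hx)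
    · exact hx

theorem fcFoldA_flagMono (rs : List (List String × String)) (st : PySem.Set String × Bool)
    (h : st.2 = true) : (rs.foldl fcStepA st).2 = true := by
  induction rs generalizing st with
  | nil => exact h
  | cons r rs ih =>
    simp only [List.foldl_cons]
    refine ih (fcStepA st r) ?_
    unfold fcStepA
    split
    · rfl
    · exact h

theorem fcFoldA_nodup (rs : List (List String × String)) (st : PySem.Set String × Bool)
    (h : st.1.Nodup) : (rs.foldl fcStepA st).1.Nodup := by
  induction rs generalizing st with
  | nil => exact h
  | cons r rs ih =>
    simp only [List.foldl_cons]
    refine ih (fcStepA st r) ?_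
    unfold fcStepA
    split
    · exact PySem.Set.nodup_add _ _ h
    · exact h

theorem fcFoldA_sound {rules : List (List String × String)} {facts : List String}
    (rs : List (List String × String)) (st : PySem.Set String × Bool)
    (hrs : ∀ r ∈ rs, r ∈ rules) (h : ∀ y ∈ st.1, Deriv rules facts y) :
    ∀ y ∈ (rs.foldl fcStepA st).1, Deriv rules facts y := by
  induction rs generalizing st with
  | nil => exact h
  | cons r rs ih =>
    simp only [List.foldl_cons]
    refine ih (fcStepA st r) (fun r' hr' => hrs r' (List.mem_cons_of_mem _ hr')) ?_
    unfold fcStepA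
    split
    · next hcond =>
      have hcond' : (∀ f ∈ r.1, f ∈ st.1) ∧ r.2 ∉ st.1 := by
        simpa [List.all_eq_true, PySem.Set.contains_iff] using hcond
      intro y hy
      rcases (PySem.Set.mem_add _ _ _).1 hy with hy | rfl
      · exact h y hy
      · exact Deriv.step r.1 r.2 (by simpa using hrs r (List.mem_cons_self))
          (fun f hf => h f (hcond'.1 f hf))
    · exact h

theorem fcFoldA_false (rs : List (List String × String)) (S : PySem.Set String) :
    (rs.foldl fcStepA (S, false)).2 = false →
    (rs.foldl fcStepA (S, false)).1 = S ∧
      ∀ r ∈ rs, (∀ f ∈ r.1, f ∈ S) → r.2 ∈ S := by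
  induction rs generalizing S with
  | nil => exact fun _ => ⟨rfl, by simp⟩
  | cons r rs ih =>
    intro hfl
    simp only [List.foldl_cons] at hfl ⊢
    by_cases hcond : ((r.1.all fun f => PySem.Set.contains S f) && !(PySem.Set.contains S r.2)) = true
    · exfalso
      have : fcStepA (S, false) r = (PySem.Set.add S r.2, true) := by
        unfold fcStepA; rw [if_pos hcond]
      rw [this] at hfl
      rw [fcFoldA_flagMono rs _ rfl] at hfl
      cases hfl
    · have heq : fcStepA (S, false) r = (S, false) := by
        unfold fcStepA; rw [if_neg hcond]
      rw [heq] at hfl ⊢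
      obtain ⟨h1, h2⟩ := ih S hfl
      refine ⟨h1, ?_⟩
      intro r' hr'
      rcases List.mem_cons.1 hr' with rfl | hr'
      · intro hall
        by_contra hc
        apply hcond
        have h1 : (r'.1.all fun f => PySem.Set.contains S f) = true := by
          simp only [List.all_eq_true]
          intro f hf
          exact (PySem.Set.contains_iff _ _).2 (hall f hf)
        have h2 : PySem.Set.contains S r'.2 = false := by
          rw [Bool.eq_false_iff]
          intro hcc
          exact hc ((PySem.Set.contains_iff _ _).1 hcc)
        rw [h1, h2]
        rfl
      · exact h2 r' hr'

theorem fcFoldA_pot_le (rules rs : List (List String × String)) (st : PySem.Set String × Bool) :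
    fcPot rules (rs.foldl fcStepA st).1 ≤ fcPot rules st.1 :=
  fcPot_le_of_subset (fcFoldA_subset rs st)

theorem fcFoldA_pot_lt {rules : List (List String × String)}
    (rs : List (List String × String)) (st : PySem.Set String × Bool)
    (hrs : ∀ r ∈ rs, r ∈ rules) (hb : st.2 = false)
    (h : (rs.foldl fcStepA st).2 = true) :
    fcPot rules (rs.foldl fcStepA st).1 < fcPot rules st.1 := by
  induction rs generalizing st with
  | nil => rw [List.foldl_nil] at h; rw [hb] at h; cases h
  | cons r rs ih =>
    simp only [List.foldl_cons] at h ⊢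
    by_cases hcond : ((r.1.all fun f => PySem.Set.contains st.1 f) && !(PySem.Set.contains st.1 r.2)) = true
    · have heq : fcStepA st r = (PySem.Set.add st.1 r.2, true) := by
        unfold fcStepA; rw [if_pos hcond]
      rw [heq]
      have hnm : r.2 ∉ st.1 := by
        have hcond' : (∀ f ∈ r.1, f ∈ st.1) ∧ r.2 ∉ st.1 := by
          simpa [List.all_eq_true, PySem.Set.contains_iff] using hcond
        exact hcond'.2
      have hlt : fcPot rules (PySem.Set.add st.1 r.2) < fcPot rules st.1 :=
        fcPot_lt_of_add (fun x hx => (PySem.Set.mem_add _ _ _).2 (Or.inl hx))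
          (List.mem_map_of_mem (hrs r List.mem_cons_self)) hnm
          ((PySem.Set.mem_add _ _ _).2 (Or.inr rfl))
      exact lt_of_le_of_lt (fcFoldA_pot_le rules rs _) hlt
    · have heq : fcStepA st r = st := by
        unfold fcStepA
        rw [if_neg hcond]
      rw [heq] at h ⊢
      exact ih _ (fun r' hr' => hrs r' (List.mem_cons_of_mem _ hr')) hb h

theorem fcLoopA_main (rules : List (List String × String)) (facts : List String) :
    ∀ (fuel : Nat) (S : PySem.Set String),
      (∀ y ∈ S, Deriv rules facts y) → S.Nodup → fcPot rules S < fuel →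
      (∀ x ∈ S, x ∈ fcLoopA rules fuel S) ∧
      (∀ y ∈ fcLoopA rules fuel S, Deriv rules facts y) ∧
      fcClosed rules (fcLoopA rules fuel S) ∧ (fcLoopA rules fuel S).Nodup := by
  intro fuel
  induction fuel with
  | zero => intro S _ _ hlt; cases Nat.not_lt_zero _ hlt
  | succ fuel ih =>
    intro S hS hnd hlt
    unfold fcLoopA
    by_cases hfl : (rules.foldl fcStepA (S, false)).2 = true
    · simp only [hfl, if_true]
      have hlt' : fcPot rules (rules.foldl fcStepA (S, false)).1 < fuel := by
        have h2 : fcPot rules (List.foldl fcStepA (S, false) rules).1 < fcPot rules S :=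
          fcFoldA_pot_lt (rules := rules) rules (S, false) (fun r hr => hr) rfl hfl
        omega
      obtain ⟨h1, h2, h3, h4⟩ := ih (rules.foldl fcStepA (S, false)).1
        (fcFoldA_sound rules (S, false) (fun r hr => hr) hS)
        (fcFoldA_nodup rules (S, false) hnd) hlt'
      exact ⟨fun x hx => h1 x (fcFoldA_subset rules (S, false) x hx), h2, h3, h4⟩
    · simp only [Bool.not_eq_true] at hfl
      simp only [hfl]
      obtain ⟨heq, hcl⟩ := fcFoldA_false rules S hfl
      simp only [Bool.false_eq_true, if_false, heq]
      exact ⟨fun x hx => hx, hS, hcl, hnd⟩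


-- ---------- the built index and counters are exact ----------
theorem fcIdxAnt_fold_getD (i : Int) (fs : List String) (d : PySem.Dict String (List Int))
    (x : String) : fs.Nodup →
    (fs.foldl (fcIdxAnt i) d).getD x [] =
      d.getD x [] ++ (if x ∈ fs then [i] else []) := by
  induction fs generalizing d with
  | nil => intro _; simp
  | cons f fs ih =>
    intro hnd
    simp only [List.foldl_cons]
    rw [ih _ (List.nodup_cons.1 hnd).2]
    unfold fcIdxAnt
    rw [PySem.Dict.getD_insert]
    by_cases hx : x = f
    · subst hx
      rw [if_pos rfl, if_neg (List.nodup_cons.1 hnd).1, if_pos List.mem_cons_self]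
      simp
    · rw [if_neg hx]
      simp only [List.mem_cons]
      simp [hx]

theorem fcBuildStep_fold_fst (l : List (Int × (List String × String)))
    (d : PySem.Dict String (List Int)) (cs : List Int) (x : String) :
    (l.foldl fcBuildStep (d, cs)).1.getD x [] =
      d.getD x [] ++ (l.filter (fun p => decide (x ∈ PySem.List.dedup p.2.1))).map (·.1) := by
  induction l generalizing d cs with
  | nil => simp
  | cons p l ih =>
    simp only [List.foldl_cons]
    have hstep : fcBuildStep (d, cs) p =
        ((PySem.List.dedup p.2.1).foldl (fcIdxAnt p.1) d,
         cs ++ [((PySem.List.dedup p.2.1).length : Int)]) := rfl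
    rw [hstep, ih]
    rw [fcIdxAnt_fold_getD _ _ _ _ (PySem.List.nodup_dedup _)]
    rw [List.filter_cons]
    by_cases hx : x ∈ p.2.1
    · simp [hx]
    · simp [hx]

theorem fcBuildStep_fold_snd (l : List (Int × (List String × String)))
    (d : PySem.Dict String (List Int)) (cs : List Int) :
    (l.foldl fcBuildStep (d, cs)).2 =
      cs ++ l.map (fun p => ((PySem.List.dedup p.2.1).length : Int)) := by
  induction l generalizing d cs with
  | nil => simp
  | cons p l ih =>
    simp only [List.foldl_cons]
    have hstep : fcBuildStep (d, cs) p =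
        ((PySem.List.dedup p.2.1).foldl (fcIdxAnt p.1) d,
         cs ++ [((PySem.List.dedup p.2.1).length : Int)]) := rfl
    rw [hstep, ih]
    simp

theorem fcBuild_counts_len (rules : List (List String × String)) :
    (fcBuild rules).2.length = rules.length := by
  unfold fcBuild
  rw [fcBuildStep_fold_snd]
  simp [PySem.List.length_enumerate]

theorem fcBuild_counts (rules : List (List String × String)) (k : Nat) (hk : k < rules.length) :
    PySem.List.pyGetD (fcBuild rules).2 (k : Int) 0 =
      ((PySem.List.dedup (rules[k]).1).length : Int) := by
  unfold fcBuild
  rw [fcBuildStep_fold_snd]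
  have hmap : (PySem.List.enumerate rules 0).map
      (fun p => ((PySem.List.dedup p.2.1).length : Int)) =
      rules.map (fun r => ((PySem.List.dedup r.1).length : Int)) := by
    rw [show (fun p : Int × (List String × String) => ((PySem.List.dedup p.2.1).length : Int)) =
      (fun r : List String × String => ((PySem.List.dedup r.1).length : Int)) ∘ (fun p => p.2)
      from rfl]
    rw [← List.map_map]
    rw [PySem.List.map_snd_enumerate]
  rw [hmap, PySem.List.pyGetD_natCast, List.nil_append,
    List.getD_eq_getElem _ _ (by simpa using hk)]
  simp

theorem fcIdx_getD (rules : List (List String × String)) (x : String) :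
    (fcBuild rules).1.getD x [] =
      ((PySem.List.enumerate rules 0).filter
        (fun p => decide (x ∈ PySem.List.dedup p.2.1))).map (·.1) := by
  unfold fcBuild
  rw [fcBuildStep_fold_fst]
  simp [PySem.Dict.getD_empty]

theorem fcIdx_mem (rules : List (List String × String)) (x : String) (i : Int) :
    i ∈ (fcBuild rules).1.getD x [] ↔
      ∃ (k : Nat) (h : k < rules.length), i = (k : Int) ∧ x ∈ (rules[k]).1 := by
  rw [fcIdx_getD]
  simp only [List.mem_map, List.mem_filter, decide_eq_true_eq, PySem.List.mem_dedup]
  constructor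
  · rintro ⟨p, ⟨hp, hmem⟩, rfl⟩
    obtain ⟨k, hk, rfl⟩ := (PySem.List.mem_enumerate_iff _ _ _).1 hp
    exact ⟨k, hk, by simp, by simpa using hmem⟩
  · rintro ⟨k, hk, rfl, hx⟩
    exact ⟨((k : Int), rules[k]), ⟨(PySem.List.mem_enumerate_iff _ _ _).2 ⟨k, hk, by simp⟩,
      hx⟩, rfl⟩

theorem fcIdx_nodup (rules : List (List String × String)) (x : String) :
    ((fcBuild rules).1.getD x []).Nodup := by
  rw [fcIdx_getD]
  refine List.Pairwise.imp (fun h => ne_of_lt h) ?_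
  refine (List.pairwise_map).2 ?_
  exact List.Pairwise.sublist List.filter_sublist (PySem.List.pairwise_lt_enumerate rules 0)

-- ---------- per-rule counters against a set of processed facts ----------
def fcCnt (r : List String × String) (P : List String) : Nat :=
  ((PySem.List.dedup r.1).filter (fun f => decide (f ∉ P))).length

theorem fcCnt_nil (r : List String × String) :
    fcCnt r [] = (PySem.List.dedup r.1).length := by
  unfold fcCnt
  rw [List.filter_eq_self.2 (by simp)]

theorem fcCnt_zero_iff (r : List String × String) (P : List String) :
    fcCnt r P = 0 ↔ ∀ f ∈ r.1, f ∈ P := by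
  unfold fcCnt
  rw [List.length_eq_zero_iff, List.filter_eq_nil_iff]
  constructor
  · intro h f hf
    have := h f ((PySem.List.mem_dedup _ _).2 hf)
    simpa using this
  · intro h f hf
    simp [h f ((PySem.List.mem_dedup _ _).1 hf)]

theorem filter_not_mem_append_len {fs P : List String} {x : String} :
    fs.Nodup → x ∈ fs → x ∉ P →
    (fs.filter (fun f => decide (f ∉ P ++ [x]))).length + 1
      = (fs.filter (fun f => decide (f ∉ P))).length := by
  induction fs with
  | nil => intro _ hx _; cases hx
  | cons f fs ih =>
    intro hnd hx hxP
    rw [List.filter_cons, List.filter_cons]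
    by_cases hfx : f = x
    · subst hfx
      have hffs : f ∉ fs := (List.nodup_cons.1 hnd).1
      rw [if_neg (by simp), if_pos (by simpa using hxP)]
      have heq : fs.filter (fun g => decide (g ∉ P ++ [f])) =
          fs.filter (fun g => decide (g ∉ P)) :=
        List.filter_congr (fun g hg => by
          have hgf : g ≠ f := fun e => hffs (e ▸ hg)
          simp [List.mem_append, hgf])
      rw [heq]
      simp
    · have hx' : x ∈ fs := (List.mem_cons.1 hx).resolve_left (fun e => hfx e.symm)
      have hiff : (decide (f ∉ P ++ [x])) = (decide (f ∉ P)) := by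
        simp [List.mem_append, hfx]
      rw [hiff]
      by_cases hfP : f ∈ P
      · rw [if_neg (by simpa using hfP), if_neg (by simpa using hfP)]
        exact ih (List.nodup_cons.1 hnd).2 hx' hxP
      · rw [if_pos (by simpa using hfP), if_pos (by simpa using hfP)]
        simp only [List.length_cons]
        have := ih (List.nodup_cons.1 hnd).2 hx' hxP
        omega

theorem fcCnt_append_mem (r : List String × String) (P : List String) (x : String)
    (hx : x ∈ r.1) (hxP : x ∉ P) : fcCnt r (P ++ [x]) + 1 = fcCnt r P :=
  filter_not_mem_append_len (PySem.List.nodup_dedup _)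
    ((PySem.List.mem_dedup _ _).2 hx) hxP

theorem fcCnt_append_not_mem (r : List String × String) (P : List String) (x : String)
    (hx : x ∉ r.1) : fcCnt r (P ++ [x]) = fcCnt r P := by
  unfold fcCnt
  congr 1
  apply List.filter_congr
  intro g hg
  have hgx : g ≠ x := fun e => hx (e ▸ (PySem.List.mem_dedup _ _).1 hg)
  simp [List.mem_append, hgx]

-- ---------- the seeding fold ----------
theorem fcInitFold_inv (rules : List (List String × String)) (facts : List String)
    (counts : List Int) :
    ∀ (l : List (Int × (List String × String))) (S : PySem.Set String) (q : List String),
    (∀ p ∈ l, p.2 ∈ rules ∧ (PySem.List.pyGetD counts p.1 0 = 0 → p.2.1 = [])) →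
    (∀ y ∈ S, Deriv rules facts y) → S.Nodup →
    (∀ y ∈ q, y ∈ S) → (∀ y ∈ S, y ∈ q) → q.Nodup →
    (∀ y ∈ S, y ∈ (l.foldl (fcInitStep counts) (S, q)).1) ∧
    (∀ y ∈ (l.foldl (fcInitStep counts) (S, q)).1, Deriv rules facts y) ∧
    (l.foldl (fcInitStep counts) (S, q)).1.Nodup ∧
    (∀ y ∈ (l.foldl (fcInitStep counts) (S, q)).2, y ∈ (l.foldl (fcInitStep counts) (S, q)).1) ∧
    (∀ y ∈ (l.foldl (fcInitStep counts) (S, q)).1, y ∈ (l.foldl (fcInitStep counts) (S, q)).2) ∧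
    (l.foldl (fcInitStep counts) (S, q)).2.Nodup ∧
    (∀ p ∈ l, PySem.List.pyGetD counts p.1 0 = 0 → p.2.2 ∈ (l.foldl (fcInitStep counts) (S, q)).1) ∧
    (l.foldl (fcInitStep counts) (S, q)).2.length + fcPot rules (l.foldl (fcInitStep counts) (S, q)).1 ≤
      q.length + fcPot rules S := by
  intro l
  induction l with
  | nil =>
    intro S q _ h1 h2 h3 h4 h5
    exact ⟨fun y hy => hy, h1, h2, h3, h4, h5, fun p hp => absurd hp (List.not_mem_nil),
      le_rfl⟩
  | cons p l ih =>
    intro S q hl hS hnd hqS hSq hqnd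
    simp only [List.foldl_cons]
    by_cases hcond : (PySem.List.pyGetD counts p.1 0 == 0 &&
        !(PySem.Set.contains S p.2.2)) = true
    · -- the rule fires
      have hcond' : PySem.List.pyGetD counts p.1 0 = 0 ∧ p.2.2 ∉ S := by
        simpa [PySem.Set.contains_iff] using hcond
      have hstep : fcInitStep counts (S, q) p =
          (PySem.Set.add S p.2.2, q ++ [p.2.2]) := by
        unfold fcInitStep
        rw [if_pos hcond]
      rw [hstep]
      have hem : p.2.1 = [] := (hl p List.mem_cons_self).2 hcond'.1
      have hsound' : ∀ y ∈ PySem.Set.add S p.2.2, Deriv rules facts y := by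
        intro y hy
        rcases (PySem.Set.mem_add _ _ _).1 hy with hy | rfl
        · exact hS y hy
        · refine Deriv.step p.2.1 p.2.2 ?_ (fun f hf => absurd hf (by simp [hem]))
          have := (hl p List.mem_cons_self).1
          simpa using this
      have hq' : ∀ y ∈ q ++ [p.2.2], y ∈ PySem.Set.add S p.2.2 := by
        intro y hy
        rcases List.mem_append.1 hy with hy | hy
        · exact (PySem.Set.mem_add _ _ _).2 (Or.inl (hqS y hy))
        · exact (PySem.Set.mem_add _ _ _).2 (Or.inr (List.mem_singleton.1 hy))
      have hSq' : ∀ y ∈ PySem.Set.add S p.2.2, y ∈ q ++ [p.2.2] := by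
        intro y hy
        rcases (PySem.Set.mem_add _ _ _).1 hy with hy | rfl
        · exact List.mem_append_left _ (hSq y hy)
        · exact List.mem_append_right _ (List.mem_singleton.2 rfl)
      have hqnd' : (q ++ [p.2.2]).Nodup := by
        rw [List.nodup_append]
        refine ⟨hqnd, List.nodup_singleton _, ?_⟩
        intro y hy z hz
        rw [List.mem_singleton.1 hz]
        exact fun e => hcond'.2 (e ▸ hqS y hy)
      obtain ⟨c1, c2, c3, c4, c5, c6, c7, c8⟩ := ih (PySem.Set.add S p.2.2) (q ++ [p.2.2])
        (fun p' hp' => hl p' (List.mem_cons_of_mem _ hp'))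
        hsound' (PySem.Set.nodup_add _ _ hnd) hq' hSq' hqnd'
      refine ⟨fun y hy => c1 y ((PySem.Set.mem_add _ _ _).2 (Or.inl hy)), c2, c3, c4, c5, c6,
        ?_, ?_⟩
      · intro p' hp' hz
        rcases List.mem_cons.1 hp' with rfl | hp'
        · exact c1 _ ((PySem.Set.mem_add _ _ _).2 (Or.inr rfl))
        · exact c7 p' hp' hz
      · have hlt : fcPot rules (PySem.Set.add S p.2.2) < fcPot rules S := by
          refine fcPot_lt_of_add (fun x hx => (PySem.Set.mem_add _ _ _).2 (Or.inl hx))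
            ?_ hcond'.2 ((PySem.Set.mem_add _ _ _).2 (Or.inr rfl))
          exact List.mem_map_of_mem (by simpa using (hl p List.mem_cons_self).1)
        simp only [List.length_append, List.length_singleton] at c8
        omega
    · have hstep : fcInitStep counts (S, q) p = (S, q) := by
        unfold fcInitStep
        rw [if_neg hcond]
      rw [hstep]
      obtain ⟨c1, c2, c3, c4, c5, c6, c7, c8⟩ := ih S q
        (fun p' hp' => hl p' (List.mem_cons_of_mem _ hp')) hS hnd hqS hSq hqnd
      refine ⟨c1, c2, c3, c4, c5, c6, ?_, c8⟩
      intro p' hp' hz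
      rcases List.mem_cons.1 hp' with rfl | hp'
      · -- counter zero but the condition failed: the consequent was already known
        have hc : p'.2.2 ∈ S := by
          by_contra hcc
          apply hcond
          have h1 : (PySem.List.pyGetD counts p'.1 0 == 0) = true := by simp [hz]
          have h2 : PySem.Set.contains S p'.2.2 = false := by
            rw [Bool.eq_false_iff]
            intro hb
            exact hcc ((PySem.Set.contains_iff _ _).1 hb)
          rw [h1, h2]
          rfl
        exact c1 _ hc
      · exact c7 p' hp' hz

-- ---------- the worklist inner fold (one popped fact) ----------
theorem fcFireFold_inv (rules : List (List String × String)) (facts P' : List String) :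
    ∀ (l : List Int) (S : PySem.Set String) (q : List String) (counts : List Int),
    l.Nodup →
    (∀ i ∈ l, ∃ (k : Nat) (hk : k < rules.length), i = (k : Int) ∧
      PySem.List.pyGetD counts (k : Int) 0 = (fcCnt (rules[k]) P' : Int) + 1) →
    counts.length = rules.length →
    (∀ (k : Nat), k < rules.length → (k : Int) ∉ l →
      PySem.List.pyGetD counts (k : Int) 0 = (fcCnt (rules.getD k ([], "")) P' : Int) ∧
      ((∀ f ∈ (rules.getD k ([], "")).1, f ∈ P') → (rules.getD k ([], "")).2 ∈ S)) →
    (∀ y ∈ q, y ∈ S) → (∀ y ∈ q, y ∉ P') → q.Nodup →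
    (∀ y ∈ S, y ∈ P' ∨ y ∈ q) → (∀ y ∈ P', y ∈ S) →
    (∀ y ∈ S, Deriv rules facts y) → S.Nodup →
    (∀ y ∈ S, y ∈ (l.foldl (fcFire rules) (S, q, counts)).1) ∧
    (l.foldl (fcFire rules) (S, q, counts)).2.2.length = rules.length ∧
    (∀ (k : Nat), k < rules.length →
      PySem.List.pyGetD (l.foldl (fcFire rules) (S, q, counts)).2.2 (k : Int) 0 =
        (fcCnt (rules.getD k ([], "")) P' : Int) ∧
      ((∀ f ∈ (rules.getD k ([], "")).1, f ∈ P') →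
        (rules.getD k ([], "")).2 ∈ (l.foldl (fcFire rules) (S, q, counts)).1)) ∧
    (∀ y ∈ (l.foldl (fcFire rules) (S, q, counts)).2.1,
      y ∈ (l.foldl (fcFire rules) (S, q, counts)).1) ∧
    (∀ y ∈ (l.foldl (fcFire rules) (S, q, counts)).2.1, y ∉ P') ∧
    (l.foldl (fcFire rules) (S, q, counts)).2.1.Nodup ∧
    (∀ y ∈ (l.foldl (fcFire rules) (S, q, counts)).1,
      y ∈ P' ∨ y ∈ (l.foldl (fcFire rules) (S, q, counts)).2.1) ∧
    (∀ y ∈ P', y ∈ (l.foldl (fcFire rules) (S, q, counts)).1) ∧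
    (∀ y ∈ (l.foldl (fcFire rules) (S, q, counts)).1, Deriv rules facts y) ∧
    (l.foldl (fcFire rules) (S, q, counts)).1.Nodup ∧
    (l.foldl (fcFire rules) (S, q, counts)).2.1.length +
        fcPot rules (l.foldl (fcFire rules) (S, q, counts)).1 ≤
      q.length + fcPot rules S := by
  intro l
  induction l with
  | nil =>
    intro S q counts _ _ hlen hout hqS hqP hqnd hSPQ hPS hsnd hSnd
    exact ⟨fun y hy => hy, hlen, fun k hk => hout k hk (List.not_mem_nil),
      hqS, hqP, hqnd, hSPQ, hPS, hsnd, hSnd, le_rfl⟩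
  | cons i l ih =>
    intro S q counts hnd hval hlen hout hqS hqP hqnd hSPQ hPS hsnd hSnd
    obtain ⟨k0, hk0, rfl, hold⟩ := hval _ List.mem_cons_self
    have hk0c : k0 < counts.length := by omega
    have hnew_k0 : PySem.List.pyGetD
        (PySem.List.pySetD counts (k0 : Int) (PySem.List.pyGetD counts (k0 : Int) 0 - 1))
        (k0 : Int) 0 = (fcCnt (rules[k0]) P' : Int) := by
      rw [PySem.List.pyGetD_pySetD_natCast counts k0 k0 _ _ hk0c, if_pos rfl, hold]
      ring
    have hnew_other : ∀ (m : Nat), m ≠ k0 →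
        PySem.List.pyGetD
          (PySem.List.pySetD counts (k0 : Int) (PySem.List.pyGetD counts (k0 : Int) 0 - 1))
          (m : Int) 0 = PySem.List.pyGetD counts (m : Int) 0 := by
      intro m hm
      rw [PySem.List.pyGetD_pySetD_natCast counts k0 m _ _ hk0c, if_neg hm]
    have hruleget : PySem.List.pyGetD rules (k0 : Int) ([], "") = rules[k0] := by
      rw [PySem.List.pyGetD_natCast, List.getD_eq_getElem rules ([], "") hk0]
    have hrulegetD : rules.getD k0 ([], "") = rules[k0] := List.getD_eq_getElem rules ([], "") hk0
    have hilnot : (k0 : Int) ∉ l := (List.nodup_cons.1 hnd).1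
    have hndl : l.Nodup := (List.nodup_cons.1 hnd).2
    have hval' : ∀ (counts' : List Int),
        (∀ (m : Nat), m ≠ k0 → PySem.List.pyGetD counts' (m : Int) 0 =
          PySem.List.pyGetD counts (m : Int) 0) →
        ∀ i ∈ l, ∃ (k : Nat) (hk : k < rules.length), i = (k : Int) ∧
          PySem.List.pyGetD counts' (k : Int) 0 = (fcCnt (rules[k]) P' : Int) + 1 := by
      intro counts' hpres i hi
      obtain ⟨k, hk, rfl, hv⟩ := hval i (List.mem_cons_of_mem _ hi)
      have hkk0 : k ≠ k0 := by
        intro rfl_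
        exact hilnot (by simpa [rfl_] using hi)
      exact ⟨k, hk, rfl, by rw [hpres k hkk0]; exact hv⟩
    simp only [List.foldl_cons]
    by_cases hz : fcCnt (rules[k0]) P' = 0
    · have hCz : (PySem.List.pyGetD
          (PySem.List.pySetD counts (k0 : Int) (PySem.List.pyGetD counts (k0 : Int) 0 - 1))
          (k0 : Int) 0 == 0) = true := by
        rw [hnew_k0]
        simp [hz]
      by_cases hcS : (rules[k0]).2 ∈ S
      · -- counter reached zero but the consequent is already known
        have hstep : fcFire rules (S, q, counts) (k0 : Int) = (S, q,
            PySem.List.pySetD counts (k0 : Int) (PySem.List.pyGetD counts (k0 : Int) 0 - 1)) := by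
          unfold fcFire
          dsimp only
          rw [hCz]
          rw [hruleget]
          have : (!PySem.Set.contains S (rules[k0]).2) = false := by
            simp [hcS]
          rw [this]
          simp
        rw [hstep]
        obtain ⟨c1, c2, c3, c4, c5, c6, c7, c8, c9, c10, c11⟩ := ih S q _
          hndl (hval' _ hnew_other) (by rw [PySem.List.length_pySetD]; exact hlen)
          (by
            intro k hk hknot
            by_cases hkk0 : k = k0
            · subst hkk0
              refine ⟨by rw [hnew_k0, hrulegetD], fun _ => by rw [hrulegetD]; exact hcS⟩
            · have := hout k hk (by
                intro hmem
                rcases List.mem_cons.1 hmem with heq | hmem'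
                · exact hkk0 (by exact_mod_cast heq)
                · exact hknot hmem')
              exact ⟨by rw [hnew_other k hkk0]; exact this.1, this.2⟩)
          hqS hqP hqnd hSPQ hPS hsnd hSnd
        exact ⟨c1, c2, c3, c4, c5, c6, c7, c8, c9, c10, c11⟩
      · -- fire: add the consequent and push it
        have hstep : fcFire rules (S, q, counts) (k0 : Int) =
            (PySem.Set.add S (rules[k0]).2, q ++ [(rules[k0]).2],
             PySem.List.pySetD counts (k0 : Int)
               (PySem.List.pyGetD counts (k0 : Int) 0 - 1)) := by
          unfold fcFire
          dsimp only
          rw [hCz]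
          rw [hruleget]
          have : (!PySem.Set.contains S (rules[k0]).2) = true := by
            simp [hcS]
          rw [this]
          simp
        rw [hstep]
        have hantsP : ∀ f ∈ (rules[k0]).1, f ∈ P' := (fcCnt_zero_iff _ _).1 hz
        have hsound' : ∀ y ∈ PySem.Set.add S (rules[k0]).2, Deriv rules facts y := by
          intro y hy
          rcases (PySem.Set.mem_add _ _ _).1 hy with hy | rfl
          · exact hsnd y hy
          · refine Deriv.step (rules[k0]).1 (rules[k0]).2 ?_
              (fun f hf => hsnd f (hPS f (hantsP f hf)))
            have h := List.getElem_mem hk0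
            simp only [Prod.mk.eta] at h ⊢
            exact h
        obtain ⟨c1, c2, c3, c4, c5, c6, c7, c8, c9, c10, c11⟩ := ih
          (PySem.Set.add S (rules[k0]).2) (q ++ [(rules[k0]).2]) _
          hndl (hval' _ hnew_other) (by rw [PySem.List.length_pySetD]; exact hlen)
          (by
            intro k hk hknot
            by_cases hkk0 : k = k0
            · subst hkk0
              exact ⟨by rw [hnew_k0, hrulegetD],
                fun _ => by rw [hrulegetD]; exact (PySem.Set.mem_add _ _ _).2 (Or.inr rfl)⟩
            · have := hout k hk (by
                intro hmem
                rcases List.mem_cons.1 hmem with heq | hmem'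
                · exact hkk0 (by exact_mod_cast heq)
                · exact hknot hmem')
              exact ⟨by rw [hnew_other k hkk0]; exact this.1,
                fun hh => (PySem.Set.mem_add _ _ _).2 (Or.inl (this.2 hh))⟩)
          (by
            intro y hy
            rcases List.mem_append.1 hy with hy | hy
            · exact (PySem.Set.mem_add _ _ _).2 (Or.inl (hqS y hy))
            · exact (PySem.Set.mem_add _ _ _).2 (Or.inr (List.mem_singleton.1 hy)))
          (by
            intro y hy
            rcases List.mem_append.1 hy with hy | hy
            · exact hqP y hy
            · rw [List.mem_singleton.1 hy]
              exact fun hp => hcS (hPS _ hp))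
          (by
            rw [List.nodup_append]
            refine ⟨hqnd, List.nodup_singleton _, ?_⟩
            intro y hy z hz
            rw [List.mem_singleton.1 hz]
            exact fun e => hcS (e ▸ hqS y hy))
          (by
            intro y hy
            rcases (PySem.Set.mem_add _ _ _).1 hy with hy | rfl
            · rcases hSPQ y hy with h | h
              · exact Or.inl h
              · exact Or.inr (List.mem_append_left _ h)
            · exact Or.inr (List.mem_append_right _ (List.mem_singleton.2 rfl)))
          (fun y hy => (PySem.Set.mem_add _ _ _).2 (Or.inl (hPS y hy)))
          hsound' (PySem.Set.nodup_add _ _ hSnd)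
        refine ⟨fun y hy => c1 y ((PySem.Set.mem_add _ _ _).2 (Or.inl hy)),
          c2, c3, c4, c5, c6, c7, c8, c9, c10, ?_⟩
        have hlt : fcPot rules (PySem.Set.add S (rules[k0]).2) < fcPot rules S := by
          refine fcPot_lt_of_add (fun x hx => (PySem.Set.mem_add _ _ _).2 (Or.inl hx))
            ?_ hcS ((PySem.Set.mem_add _ _ _).2 (Or.inr rfl))
          exact List.mem_map_of_mem (List.getElem_mem hk0)
        simp only [List.length_append, List.length_singleton] at c11
        omega
    · -- the counter is still positive
      have hCz : (PySem.List.pyGetD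
          (PySem.List.pySetD counts (k0 : Int) (PySem.List.pyGetD counts (k0 : Int) 0 - 1))
          (k0 : Int) 0 == 0) = false := by
        rw [hnew_k0]
        simp only [beq_eq_false_iff_ne, ne_eq]
        exact fun h => hz (by exact_mod_cast h)
      have hstep : fcFire rules (S, q, counts) (k0 : Int) = (S, q,
          PySem.List.pySetD counts (k0 : Int) (PySem.List.pyGetD counts (k0 : Int) 0 - 1)) := by
        unfold fcFire
        dsimp only
        rw [hCz]
        simp
      rw [hstep]
      obtain ⟨c1, c2, c3, c4, c5, c6, c7, c8, c9, c10, c11⟩ := ih S q _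
        hndl (hval' _ hnew_other) (by rw [PySem.List.length_pySetD]; exact hlen)
        (by
          intro k hk hknot
          by_cases hkk0 : k = k0
          · subst hkk0
            refine ⟨by rw [hnew_k0, hrulegetD], fun hall => ?_⟩
            rw [hrulegetD] at hall
            exact absurd ((fcCnt_zero_iff _ _).2 hall) hz
          · have := hout k hk (by
              intro hmem
              rcases List.mem_cons.1 hmem with heq | hmem'
              · exact hkk0 (by exact_mod_cast heq)
              · exact hknot hmem')
            exact ⟨by rw [hnew_other k hkk0]; exact this.1, this.2⟩)
        hqS hqP hqnd hSPQ hPS hsnd hSnd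
      exact ⟨c1, c2, c3, c4, c5, c6, c7, c8, c9, c10, c11⟩

-- ---------- B's main loop ----------
theorem fcLoopB_main (rules : List (List String × String)) (facts : List String) :
    ∀ (fuel : Nat) (S : PySem.Set String) (q : List String) (counts : List Int) (P : List String),
    counts.length = rules.length →
    (∀ (k : Nat), k < rules.length →
      PySem.List.pyGetD counts (k : Int) 0 = (fcCnt (rules.getD k ([], "")) P : Int)) →
    (∀ (k : Nat), k < rules.length →
      (∀ f ∈ (rules.getD k ([], "")).1, f ∈ P) → (rules.getD k ([], "")).2 ∈ S) →
    (∀ y ∈ q, y ∈ S) → (∀ y ∈ q, y ∉ P) → q.Nodup →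
    (∀ y ∈ S, y ∈ P ∨ y ∈ q) → (∀ y ∈ P, y ∈ S) →
    (∀ y ∈ S, Deriv rules facts y) → S.Nodup →
    q.length + fcPot rules S < fuel →
    (∀ x ∈ S, x ∈ fcLoopB rules (fcBuild rules).1 fuel (S, q, counts)) ∧
    (∀ y ∈ fcLoopB rules (fcBuild rules).1 fuel (S, q, counts), Deriv rules facts y) ∧
    fcClosed rules (fcLoopB rules (fcBuild rules).1 fuel (S, q, counts)) ∧
    (fcLoopB rules (fcBuild rules).1 fuel (S, q, counts)).Nodup := by
  intro fuel
  induction fuel with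
  | zero => intro S q counts P _ _ _ _ _ _ _ _ _ _ hm; cases Nat.not_lt_zero _ hm
  | succ fuel ih =>
    intro S q counts P hlen hcounts hfired hqS hqP hqnd hSPQ hPS hsnd hSnd hm
    by_cases h : q = []
    · subst h
      have heq : fcLoopB rules (fcBuild rules).1 (fuel + 1) (S, [], counts) = S := by
        rw [fcLoopB]
        rw [dif_pos rfl]
      rw [heq]
      refine ⟨fun x hx => hx, hsnd, ?_, hSnd⟩
      intro r hr hall
      obtain ⟨k, hk, hkr⟩ := List.mem_iff_getElem.1 hr
      have hgd : rules.getD k ([], "") = r := by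
        rw [List.getD_eq_getElem rules ([], "") hk, hkr]
      have : ∀ f ∈ r.1, f ∈ P := by
        intro f hf
        rcases hSPQ f (hall f hf) with hP | hq
        · exact hP
        · cases hq
      have := hfired k hk (by rw [hgd]; exact this)
      rw [hgd] at this
      exact this
    · have hx_q : q.getLast h ∈ q := List.getLast_mem h
      have hxS : q.getLast h ∈ S := hqS _ hx_q
      have hxP : q.getLast h ∉ P := hqP _ hx_q
      have hsplit : q.dropLast ++ [q.getLast h] = q := List.dropLast_concat_getLast h
      have hxrest : q.getLast h ∉ q.dropLast := by
        intro hm'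
        rw [← hsplit] at hqnd
        rw [List.nodup_append] at hqnd
        exact hqnd.2.2 _ hm' _ (List.mem_singleton.2 rfl) rfl
      have heq : fcLoopB rules (fcBuild rules).1 (fuel + 1) (S, q, counts) =
          fcLoopB rules (fcBuild rules).1 fuel
            (((fcBuild rules).1.getD (q.getLast h) []).foldl (fcFire rules)
              (S, q.dropLast, counts)) := by
        conv_lhs => rw [fcLoopB]
        rw [dif_neg h]
      rw [heq]
      obtain ⟨c1, c2, c3, c4, c5, c6, c7, c8, c9, c10, c11⟩ :=
        fcFireFold_inv rules facts (P ++ [q.getLast h])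
          ((fcBuild rules).1.getD (q.getLast h) []) S q.dropLast counts
          (fcIdx_nodup rules _)
          (by
            intro i hi
            obtain ⟨k, hk, rfl, hxk⟩ := (fcIdx_mem rules _ i).1 hi
            refine ⟨k, hk, rfl, ?_⟩
            have hgd : rules.getD k ([], "") = rules[k] :=
              List.getD_eq_getElem rules ([], "") hk
            rw [hcounts k hk, hgd]
            have := fcCnt_append_mem (rules[k]) P (q.getLast h) hxk hxP
            omega)
          hlen
          (by
            intro k hk hknot
            have hgd : rules.getD k ([], "") = rules[k] :=
              List.getD_eq_getElem rules ([], "") hk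
            have hxk : q.getLast h ∉ (rules[k]).1 := by
              intro hmem
              exact hknot ((fcIdx_mem rules _ _).2 ⟨k, hk, rfl, hmem⟩)
            constructor
            · rw [hcounts k hk, hgd]
              rw [fcCnt_append_not_mem _ _ _ hxk]
            · intro hall
              refine hfired k hk ?_
              intro f hf
              rcases List.mem_append.1 (hall f hf) with hfP | hfx
              · exact hfP
              · exfalso
                rw [hgd] at hf
                exact hxk ((List.mem_singleton.1 hfx) ▸ hf)
            )
          (fun y hy => hqS y ((List.dropLast_sublist q).subset hy))
          (by
            intro y hy hmem
            rcases List.mem_append.1 hmem with hP | hx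
            · exact hqP y ((List.dropLast_sublist q).subset hy) hP
            · exact hxrest ((List.mem_singleton.1 hx) ▸ hy)
            )
          (hqnd.sublist (List.dropLast_sublist q))
          (by
            intro y hy
            rcases hSPQ y hy with hP | hq'
            · exact Or.inl (List.mem_append_left _ hP)
            · rw [← hsplit] at hq'
              rcases List.mem_append.1 hq' with hrest | hlast
              · exact Or.inr hrest
              · exact Or.inl (List.mem_append_right _ hlast))
          (by
            intro y hy
            rcases List.mem_append.1 hy with hP | hx
            · exact hPS y hP
            · exact (List.mem_singleton.1 hx) ▸ hxS)
          hsnd hSnd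
      have hmeas : ((((fcBuild rules).1.getD (q.getLast h) []).foldl (fcFire rules)
          (S, q.dropLast, counts)).2.1).length +
          fcPot rules ((((fcBuild rules).1.getD (q.getLast h) []).foldl (fcFire rules)
            (S, q.dropLast, counts)).1) < fuel := by
        have hlen' : q.dropLast.length = q.length - 1 := List.length_dropLast
        have hpos : 0 < q.length := List.length_pos_iff.2 h
        omega
      obtain ⟨e1, e2, e3, e4⟩ := ih _ _ _ (P ++ [q.getLast h]) c2
        (fun k hk => (c3 k hk).1)
        (fun k hk => (c3 k hk).2)
        c4 c5 c6 c7
        (by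
          intro y hy
          rcases List.mem_append.1 hy with hP | hx
          · exact c1 y (hPS y hP)
          · exact c1 y ((List.mem_singleton.1 hx) ▸ hxS))
        c9 c10 hmeas
      exact ⟨fun x hx => e1 x (c1 x hx), e2, e3, e4⟩

-- both ports compute {x | Deriv rules facts x}; their sorted presentations agree
theorem fc_main_eq (rules : List (List String × String)) (facts : List String) :
    forward_chain rules facts = forward_chain_alt rules facts := by
  unfold forward_chain forward_chain_alt
  dsimp only
  have hA := fcLoopA_main rules facts (rules.length + 1) (PySem.Set.ofList facts)
    (fun y hy => Deriv.base y ((PySem.Set.mem_ofList _ _).1 hy))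
    (PySem.Set.nodup_ofList _)
    (Nat.lt_succ_of_le (fcPot_le_length rules _))
  obtain ⟨hA1, hA2, hA3, hA4⟩ := hA
  -- B: the seeding fold
  have hmemdd : ∀ y ∈ PySem.List.dedup facts, y ∈ PySem.Set.ofList facts := by
    rw [PySem.List.dedup_eq_ofList]
    exact fun y hy => hy
  have hmemdd' : ∀ y ∈ PySem.Set.ofList facts, y ∈ PySem.List.dedup facts := by
    rw [PySem.List.dedup_eq_ofList]
    exact fun y hy => hy
  have hnddd : (PySem.List.dedup facts).Nodup := PySem.List.nodup_dedup _
  have hl0 : ∀ p ∈ PySem.List.enumerate rules 0, p.2 ∈ rules ∧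
      (PySem.List.pyGetD (fcBuild rules).2 p.1 0 = 0 → p.2.1 = []) := by
    intro p hp
    obtain ⟨k, hk, rfl⟩ := (PySem.List.mem_enumerate_iff _ _ _).1 hp
    refine ⟨by simp only []; exact List.getElem_mem hk, ?_⟩
    intro hz
    have hz' : PySem.List.pyGetD (fcBuild rules).2 (k : Int) 0 = 0 := by
      simpa using hz
    rw [fcBuild_counts rules k hk] at hz'
    have hdd : PySem.List.dedup (rules[k]).1 = [] := by
      have : (PySem.List.dedup (rules[k]).1).length = 0 := by exact_mod_cast hz'
      exact List.length_eq_zero_iff.1 this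
    cases hnil : (rules[k]).1 with
    | nil => simp
    | cons a t =>
      exfalso
      have : a ∈ PySem.List.dedup (rules[k]).1 :=
        (PySem.List.mem_dedup _ _).2 (by rw [hnil]; exact List.mem_cons_self)
      rw [hdd] at this
      cases this
  obtain ⟨d1, d2, d3, d4, d5, d6, d7, d8⟩ := fcInitFold_inv rules facts (fcBuild rules).2
    (PySem.List.enumerate rules 0) (PySem.Set.ofList facts) (PySem.List.dedup facts)
    hl0
    (fun y hy => Deriv.base y ((PySem.Set.mem_ofList _ _).1 hy))
    (PySem.Set.nodup_ofList _) hmemdd hmemdd' hnddd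
  -- B: the main loop, started with P = []
  have hcounts0 : ∀ (k : Nat), k < rules.length →
      PySem.List.pyGetD (fcBuild rules).2 (k : Int) 0 =
        (fcCnt (rules.getD k ([], "")) [] : Int) := by
    intro k hk
    rw [fcBuild_counts rules k hk, List.getD_eq_getElem rules ([], "") hk, fcCnt_nil]
  have hfired0 : ∀ (k : Nat), k < rules.length →
      (∀ f ∈ (rules.getD k ([], "")).1, f ∈ ([] : List String)) →
      (rules.getD k ([], "")).2 ∈
        ((PySem.List.enumerate rules 0).foldl (fcInitStep (fcBuild rules).2)
          (PySem.Set.ofList facts, PySem.List.dedup facts)).1 := by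
    intro k hk hall
    have hgd : rules.getD k ([], "") = rules[k] := List.getD_eq_getElem rules ([], "") hk
    have hnil : (rules[k]).1 = [] := by
      cases hnl : (rules[k]).1 with
      | nil => rfl
      | cons a t =>
        exfalso
        have := hall a (by rw [hgd, hnl]; exact List.mem_cons_self)
        cases this
    have hp : ((k : Int), rules[k]) ∈ PySem.List.enumerate rules 0 :=
      (PySem.List.mem_enumerate_iff _ _ _).2 ⟨k, hk, by simp⟩
    have := d7 ((k : Int), rules[k]) hp (by
      rw [fcBuild_counts rules k hk, hnil]
      simp)
    rw [hgd]
    exact this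
  have hmeas0 : (((PySem.List.enumerate rules 0).foldl (fcInitStep (fcBuild rules).2)
      (PySem.Set.ofList facts, PySem.List.dedup facts)).2).length +
      fcPot rules (((PySem.List.enumerate rules 0).foldl (fcInitStep (fcBuild rules).2)
        (PySem.Set.ofList facts, PySem.List.dedup facts)).1) <
      facts.length + rules.length + 1 := by
    have h1 : fcPot rules (PySem.Set.ofList facts) ≤ rules.length := fcPot_le_length _ _
    have h2 : (PySem.List.dedup facts).length ≤ facts.length := by
      rw [PySem.List.dedup_eq_ofList]
      exact PySem.Set.length_ofList_le _
    omega
  obtain ⟨e1, e2, e3, e4⟩ := fcLoopB_main rules facts (facts.length + rules.length + 1)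
    (((PySem.List.enumerate rules 0).foldl (fcInitStep (fcBuild rules).2)
      (PySem.Set.ofList facts, PySem.List.dedup facts)).1)
    (((PySem.List.enumerate rules 0).foldl (fcInitStep (fcBuild rules).2)
      (PySem.Set.ofList facts, PySem.List.dedup facts)).2)
    (fcBuild rules).2 []
    (fcBuild_counts_len rules) hcounts0 hfired0 d4 (fun y _ hy => (List.not_mem_nil) hy)
    d6 (fun y hy => Or.inr (d5 y hy)) (fun y hy => absurd hy (List.not_mem_nil))
    d2 d3 hmeas0
  -- closure both ways
  have hderivA : ∀ x, Deriv rules facts x →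
      x ∈ fcLoopA rules (rules.length + 1) (PySem.Set.ofList facts) := by
    intro x hx
    induction hx with
    | base y hy => exact hA1 y ((PySem.Set.mem_ofList _ _).2 hy)
    | step a cc hmem hall ihh => exact hA3 (a, cc) hmem ihh
  have hderivB : ∀ x, Deriv rules facts x →
      x ∈ fcLoopB rules (fcBuild rules).1 (facts.length + rules.length + 1)
        (((PySem.List.enumerate rules 0).foldl (fcInitStep (fcBuild rules).2)
          (PySem.Set.ofList facts, PySem.List.dedup facts)).1,
         ((PySem.List.enumerate rules 0).foldl (fcInitStep (fcBuild rules).2)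
          (PySem.Set.ofList facts, PySem.List.dedup facts)).2,
         (fcBuild rules).2) := by
    intro x hx
    induction hx with
    | base y hy => exact e1 y (d1 y ((PySem.Set.mem_ofList _ _).2 hy))
    | step a cc hmem hall ihh => exact e3 (a, cc) hmem ihh
  have hiff : ∀ x, x ∈ fcLoopA rules (rules.length + 1) (PySem.Set.ofList facts) ↔
      x ∈ fcLoopB rules (fcBuild rules).1 (facts.length + rules.length + 1)
        (((PySem.List.enumerate rules 0).foldl (fcInitStep (fcBuild rules).2)
          (PySem.Set.ofList facts, PySem.List.dedup facts)).1,
         ((PySem.List.enumerate rules 0).foldl (fcInitStep (fcBuild rules).2)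
          (PySem.Set.ofList facts, PySem.List.dedup facts)).2,
         (fcBuild rules).2) :=
    fun x => ⟨fun hx => hderivB x (hA2 x hx), fun hx => hderivA x (e2 x hx)⟩
  have hperm := (List.perm_ext_iff_of_nodup hA4 e4).2 hiff
  exact PySem.List.sorted_eq_sorted_of_perm _ _ (fun x => x) (fun a b hab => hab) hperm




-- ===== VERDICT (by name: the statement is the Claim_ definition above) =====
theorem forward_chain_spec : Claim_equal_forward_chain := by
  intro rules facts _
  unfold Spec_forward_chain
  exact fc_main_eq rules facts
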